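-- pv_equiv track=rewrite | github.com/adityakeerthi/competitive-programming | binary-search/Unique-People-in-Contact-List.py | solve
-- ===== SOURCE A (Python) =====
-- def solve(contacts):
--     visited = set()
--     if len(contacts) == 0:
--         return 0
--     t = 0
--     for i in range(len(contacts)):
--         add = True
--         contactTwo = contacts[i]
--         for l in range(len(contactTwo)):
--             c = contactTwo[l]
--             if c in visited:
--                 add = False
--             else:
--                 visited.add(c)
--         if add:
--             t += 1
--
--     return t
-- ===== SOURCE B (Python) =====
-- def solve(contacts):
--     # Pass 1: index every member by the position (contact index, slot) of its
--     # globally first occurrence.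
--     first = {}
--     for i, contact in enumerate(contacts):
--         for l, c in enumerate(contact):
--             if c not in first:
--                 first[c] = (i, l)
--     # Pass 2: a contact is all-new iff every one of its slots IS the first
--     # occurrence of its member.
--     t = 0
--     for i, contact in enumerate(contacts):
--         if all(first[c] == (i, l) for l, c in enumerate(contact)):
--             t += 1
--     return t
-- ===== Notes on version B (the rewrite author's own statement) =====
-- stated objective: alternative
-- what changed: Replaces A's single pass with a mutable visited-set and per-element boolean flag by two staged passes: pass 1 builds a first-occurrence index mapping each member to the (contact, slot) where it first appears, pass 2 purely counts the contacts all of whose slots are their member's first occurrence.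
import Mathlib
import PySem

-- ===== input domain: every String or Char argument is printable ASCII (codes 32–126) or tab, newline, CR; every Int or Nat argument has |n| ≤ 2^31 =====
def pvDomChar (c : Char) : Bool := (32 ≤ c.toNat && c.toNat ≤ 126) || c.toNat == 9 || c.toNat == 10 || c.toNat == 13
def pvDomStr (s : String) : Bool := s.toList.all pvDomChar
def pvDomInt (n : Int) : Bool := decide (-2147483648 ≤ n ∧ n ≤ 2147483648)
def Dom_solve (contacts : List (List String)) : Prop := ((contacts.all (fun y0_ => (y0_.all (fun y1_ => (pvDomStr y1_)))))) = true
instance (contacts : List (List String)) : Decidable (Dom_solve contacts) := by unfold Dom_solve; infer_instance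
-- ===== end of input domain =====

-- B replaces A's single pass with a mutable visited set by two staged passes: a
-- first pass precomputes a first-occurrence index (member -> (contact, slot)),
-- and a second pure pass counts the contacts each of whose slots is its
-- member's first occurrence; objective: alternative decomposition.

-- ===== PORT A =====
def solve (contacts : List (List String)) : Int :=
  let visited : PySem.Set String := PySem.Set.empty
  if contacts.length == 0 then 0
  else
    let st :=
      (PySem.List.pyRange 0 (contacts.length : Int) 1).foldl
        (fun (st : PySem.Set String × Int) i =>
          let contactTwo := PySem.List.pyGetD contacts i []
          let inner := contactTwo.foldl
            (fun (p : PySem.Set String × Bool) c =>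
              if PySem.Set.contains p.1 c then (p.1, false)
              else (PySem.Set.add p.1 c, p.2))
            (st.1, true)
          (inner.1, if inner.2 then st.2 + 1 else st.2))
        (visited, 0)
    st.2

-- ===== PORT B =====
def solve_alt (contacts : List (List String)) : Int :=
  let first : PySem.Dict String (Int × Int) :=
    (PySem.List.enumerate contacts 0).foldl
      (fun d p =>
        (PySem.List.enumerate p.2 0).foldl
          (fun d q => if d.contains q.2 then d else d.insert q.2 (p.1, q.1)) d)
      PySem.Dict.empty
  (PySem.List.enumerate contacts 0).foldl
    (fun (t : Int) p =>
      if (PySem.List.enumerate p.2 0).all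
          (fun q => first.get? q.2 == some (p.1, q.1))
      then t + 1 else t) 0

-- ===== PRECONDITION & SPEC =====
def Spec_solve (contacts : List (List String)) (out : Int) : Prop := out = solve_alt contacts
instance (contacts : List (List String)) (out : Int) : Decidable (Spec_solve contacts out) := by unfold Spec_solve; infer_instance

-- ===== CLAIM =====
def Claim_equal_solve : Prop := ∀ (contacts : List (List String)), Dom_solve contacts → Spec_solve contacts (solve contacts)

-- ===== LEMMAS AND PROOFS =====
theorem pv_inner_get? (xs : List String) (s : Int) (d : PySem.Dict String (Int × Int))
    (i : Int) (c : String) :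
    (((PySem.List.enumerate xs s).foldl
        (fun d q => if PySem.Dict.contains d q.2 then d else PySem.Dict.insert d q.2 (i, q.1)) d)).get? c
      = ((d.get? c).orElse (fun _ => (PySem.List.index? xs c).map (fun (l : Nat) => (i, s + (l : Int))))) := by
  induction xs generalizing s d with
  | nil =>
    rw [PySem.List.enumerate_nil, List.foldl_nil]
    cases d.get? c <;> simp [PySem.List.index?]
  | cons x xs ih =>
    rw [PySem.List.enumerate_cons, List.foldl_cons]
    dsimp only
    by_cases hcx : PySem.Dict.contains d x = true
    · rw [if_pos hcx, ih]
      by_cases hc : c = x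
      · subst hc
        rw [PySem.Dict.contains_eq_isSome_get?] at hcx
        obtain ⟨v, hv⟩ := Option.isSome_iff_exists.1 hcx
        simp [hv]
      · rw [PySem.List.index?_cons_of_ne _ (Ne.symm hc)]
        cases d.get? c <;> cases PySem.List.index? xs c <;>
          simp <;> push_cast <;> ring_nf
    · rw [if_neg hcx, ih]
      by_cases hc : c = x
      · subst hc
        have hnone : d.get? c = none := by
          rw [PySem.Dict.get?_eq_none_iff_contains]
          simpa using hcx
        rw [PySem.Dict.get?_insert_self, PySem.List.index?_cons_self, hnone]
        simp
      · rw [PySem.Dict.get?_insert_of_ne _ _ hc, PySem.List.index?_cons_of_ne _ (Ne.symm hc)]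
        cases d.get? c <;> cases PySem.List.index? xs c <;>
          simp <;> push_cast <;> ring_nf

def pvFo (k : Int) : List (List String) → String → Option (Int × Int)
  | [], _ => none
  | xs :: rest, c =>
    match PySem.List.index? xs c with
    | some l => some (k, (l : Int))
    | none => pvFo (k + 1) rest c

theorem pv_outer_get? (cs : List (List String)) (k : Int) (d : PySem.Dict String (Int × Int)) (c : String) :
    (((PySem.List.enumerate cs k).foldl
        (fun d p =>
          (PySem.List.enumerate p.2 0).foldl
            (fun d q => if PySem.Dict.contains d q.2 then d else PySem.Dict.insert d q.2 (p.1, q.1)) d) d)).get? c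
      = ((d.get? c).orElse (fun _ => pvFo k cs c)) := by
  induction cs generalizing k d with
  | nil =>
    rw [PySem.List.enumerate_nil, List.foldl_nil]
    cases d.get? c <;> simp [pvFo]
  | cons xs cs ih =>
    rw [PySem.List.enumerate_cons, List.foldl_cons]
    dsimp only
    rw [ih, pv_inner_get?]
    cases hd : d.get? c <;> cases hidx : PySem.List.index? xs c <;>
      simp only [pvFo, hidx, hd] <;> simp [hd]

theorem pv_fo_append_of_not_mem (p : List (List String)) (rest : List (List String)) (k : Int) (c : String)
    (h : c ∉ p.flatten) : pvFo k (p ++ rest) c = pvFo (k + p.length) rest c := by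
  induction p generalizing k with
  | nil => simp
  | cons xs p ih =>
    simp only [List.flatten_cons, List.mem_append] at h
    push_neg at h
    have hidx : PySem.List.index? xs c = none :=
      (PySem.List.index?_eq_none_iff xs c).2 h.1
    simp only [List.cons_append, pvFo, hidx]
    rw [ih _ h.2]
    congr 1
    simp only [List.length_cons]
    push_cast
    ring

theorem pv_fo_append_of_mem (p : List (List String)) (rest : List (List String)) (k : Int) (c : String)
    (h : c ∈ p.flatten) : ∃ j l, pvFo k (p ++ rest) c = some (j, l) ∧ j < k + p.length := by
  induction p generalizing k with
  | nil => simp at h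
  | cons xs p ih =>
    simp only [List.flatten_cons, List.mem_append] at h
    by_cases hx : c ∈ xs
    · obtain ⟨l, hl⟩ := Option.isSome_iff_exists.1 ((PySem.List.index?_isSome_iff xs c).2 hx)
      refine ⟨k, l, ?_, ?_⟩
      · simp only [List.cons_append, pvFo, hl]
      · simp only [List.length_cons]
        push_cast
        omega
    · have hp : c ∈ p.flatten := h.resolve_left hx
      have hidx : PySem.List.index? xs c = none :=
        (PySem.List.index?_eq_none_iff xs c).2 hx
      obtain ⟨j, l, hjl, hlt⟩ := ih (k + 1) hp
      refine ⟨j, l, ?_, ?_⟩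
      · simp only [List.cons_append, pvFo, hidx]
        exact hjl
      · simp only [List.length_cons]
        push_cast
        push_cast at hlt
        omega

theorem pv_index?_self (xs : List String) (h : xs.Nodup) (m : Nat) (hm : m < xs.length) :
    PySem.List.index? xs xs[m] = some m := by
  rw [PySem.List.index?_eq_some_iff]
  refine ⟨xs.take m, xs.drop (m + 1), ?_, ?_, ?_⟩
  · rw [List.getElem_cons_drop]
    exact (List.take_append_drop m xs).symm
  · simp [Nat.min_eq_left (Nat.le_of_lt hm)]
  · intro hmem
    obtain ⟨j, hj, hje⟩ := List.getElem_of_mem hmem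
    have hjm : j < m := ((by simpa using hj : j < m ∧ j < xs.length)).1
    rw [List.getElem_take] at hje
    have := (List.Nodup.getElem_inj_iff h).1 hje
    omega

theorem pv_cond_iff (p rest : List (List String)) (xs : List String) :
    ((∀ q ∈ PySem.List.enumerate xs 0, pvFo 0 (p ++ xs :: rest) q.2 = some ((p.length : Int), q.1))
      ↔ (xs.Nodup ∧ ∀ c ∈ xs, c ∉ p.flatten)) := by
  constructor
  · intro hall
    have hall' : ∀ (m : Nat), (hm : m < xs.length) →
        pvFo 0 (p ++ xs :: rest) xs[m] = some ((p.length : Int), (m : Int)) := by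
      intro m hm
      have hq : ((0 : Int) + (m : Int), xs[m]) ∈ PySem.List.enumerate xs 0 :=
        (PySem.List.mem_enumerate_iff xs 0 _).2 ⟨m, hm, rfl⟩
      have h1 := hall _ hq
      simpa using h1
    have hdis : ∀ c ∈ xs, c ∉ p.flatten := by
      intro c hc hcp
      obtain ⟨m, hm, hcm⟩ := List.getElem_of_mem hc
      have h1 := hall' m hm
      rw [hcm] at h1
      obtain ⟨j, l, hjl, hlt⟩ := pv_fo_append_of_mem p (xs :: rest) 0 c hcp
      rw [h1] at hjl
      have hj : (p.length : Int) = j := congrArg Prod.fst (Option.some.inj hjl)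
      omega
    refine ⟨?_, hdis⟩
    rw [List.Nodup, List.pairwise_iff_getElem]
    intro a b ha hb hab heq
    have h1 := hall' b hb
    rw [pv_fo_append_of_not_mem p (xs :: rest) 0 xs[b] (hdis _ (List.getElem_mem hb))] at h1
    simp only [pvFo] at h1
    cases hidx : PySem.List.index? xs xs[b] with
    | none =>
      rw [hidx] at h1
      exact absurd ((PySem.List.index?_eq_none_iff xs xs[b]).1 hidx)
        (by simp [List.getElem_mem hb])
    | some l =>
      rw [hidx] at h1
      obtain ⟨hk, _, hfirst⟩ := PySem.List.getElem_of_index?_eq_some hidx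
      have hlb : (l : Int) = (b : Int) := congrArg Prod.snd (Option.some.inj h1)
      have hlbn : l = b := by exact_mod_cast hlb
      exact hfirst a (by omega) heq
  · rintro ⟨hnd, hdis⟩ q hq
    obtain ⟨m, hm, rfl⟩ := (PySem.List.mem_enumerate_iff xs 0 q).1 hq
    dsimp only
    rw [pv_fo_append_of_not_mem p (xs :: rest) 0 xs[m] (hdis _ (List.getElem_mem hm))]
    simp only [pvFo]
    rw [pv_index?_self xs hnd m hm]
    simp

theorem pv_innerA (xs : List String) (V : PySem.Set String) (a : Bool) :
    xs.foldl
      (fun (p : PySem.Set String × Bool) c =>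
        if PySem.Set.contains p.1 c then (p.1, false)
        else (PySem.Set.add p.1 c, p.2)) (V, a)
      = (PySem.Set.update V xs, a && decide (xs.Nodup ∧ ∀ c ∈ xs, c ∉ V)) := by
  induction xs generalizing V a with
  | nil => simp [PySem.Set.update_nil]
  | cons x xs ih =>
    rw [List.foldl_cons, PySem.Set.update_cons]
    by_cases hx : x ∈ V
    · have hc : PySem.Set.contains V x = true := (PySem.Set.contains_iff V x).2 hx
      rw [if_pos hc, ih, PySem.Set.add_of_mem hx]
      have hfalse : decide ((x :: xs).Nodup ∧ ∀ c ∈ x :: xs, c ∉ V) = false :=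
        decide_eq_false (by rintro ⟨-, h⟩; exact h x List.mem_cons_self hx)
      rw [hfalse]
      simp
    · have hc : ¬ PySem.Set.contains V x = true :=
        fun h => hx ((PySem.Set.contains_iff V x).1 h)
      rw [if_neg hc, ih]
      have hiff : (xs.Nodup ∧ ∀ c ∈ xs, c ∉ PySem.Set.add V x)
          ↔ ((x :: xs).Nodup ∧ ∀ c ∈ x :: xs, c ∉ V) := by
        simp only [List.nodup_cons, List.mem_cons, PySem.Set.mem_add]
        constructor
        · rintro ⟨hnd, h⟩
          refine ⟨⟨fun hxm => absurd (Or.inr rfl) (h x hxm), hnd⟩, ?_⟩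
          rintro c (rfl | hc')
          · exact hx
          · exact fun hcV => h c hc' (Or.inl hcV)
        · rintro ⟨⟨hxn, hnd⟩, h⟩
          refine ⟨hnd, fun c hc' => ?_⟩
          rintro (hcV | rfl)
          · exact h c (Or.inr hc') hcV
          · exact hxn hc'
      rw [decide_eq_decide.2 hiff]

theorem pv_main (contacts : List (List String)) (rest p : List (List String))
    (V : PySem.Set String) (t : Int) (hsplit : contacts = p ++ rest)
    (hV : ∀ c, c ∈ V ↔ c ∈ p.flatten) :
    (rest.foldl
        (fun (st : PySem.Set String × Int) contactTwo =>
          let inner := contactTwo.foldl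
            (fun (p : PySem.Set String × Bool) c =>
              if PySem.Set.contains p.1 c then (p.1, false)
              else (PySem.Set.add p.1 c, p.2))
            (st.1, true)
          (inner.1, if inner.2 then st.2 + 1 else st.2)) (V, t)).2
      = (PySem.List.enumerate rest (p.length : Int)).foldl
          (fun (t : Int) q =>
            if (PySem.List.enumerate q.2 0).all
                (fun r => pvFo 0 contacts r.2 == some (q.1, r.1))
            then t + 1 else t) t := by
  induction rest generalizing p V t with
  | nil => rw [PySem.List.enumerate_nil, List.foldl_nil, List.foldl_nil]
  | cons xs rest ih =>
    rw [List.foldl_cons, PySem.List.enumerate_cons, List.foldl_cons]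
    dsimp only
    rw [pv_innerA xs V true, Bool.true_and]
    have hcond : ((PySem.List.enumerate xs 0).all
        (fun r => pvFo 0 contacts r.2 == some ((p.length : Int), r.1)))
        = decide (xs.Nodup ∧ ∀ c ∈ xs, c ∉ V) := by
      rw [Bool.eq_iff_iff]
      simp only [List.all_eq_true, beq_iff_eq, decide_eq_true_eq]
      rw [hsplit]
      rw [pv_cond_iff p rest xs]
      constructor
      · rintro ⟨hnd, h⟩
        exact ⟨hnd, fun c hc hcV => h c hc ((hV c).1 hcV)⟩
      · rintro ⟨hnd, h⟩
        exact ⟨hnd, fun c hc hcp => h c hc ((hV c).2 hcp)⟩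
    rw [hcond]
    have hsplit' : contacts = (p ++ [xs]) ++ rest := by
      rw [hsplit]; simp
    have hV' : ∀ c, c ∈ PySem.Set.update V xs ↔ c ∈ (p ++ [xs]).flatten := by
      intro c
      rw [PySem.Set.mem_update]
      simp [hV c]
    have hlen : (p.length : Int) + 1 = ((p ++ [xs]).length : Int) := by
      simp
    rw [hlen]
    exact ih (p ++ [xs]) (PySem.Set.update V xs) _ hsplit' hV'


-- ===== VERDICT =====
theorem solve_spec : Claim_equal_solve := by
  intro contacts _
  unfold Spec_solve solve solve_alt
  by_cases h : contacts.length == 0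
  · rw [if_pos h]
    cases contacts with
    | nil => rfl
    | cons c cs => simp at h
  · rw [if_neg h]
    rw [PySem.List.foldl_pyRange_zero_pyGetD' contacts []
      (fun (st : PySem.Set String × Int) contactTwo =>
        let inner := contactTwo.foldl
          (fun (p : PySem.Set String × Bool) c =>
            if PySem.Set.contains p.1 c then (p.1, false)
            else (PySem.Set.add p.1 c, p.2))
          (st.1, true)
        (inner.1, if inner.2 then st.2 + 1 else st.2)) (PySem.Set.empty, 0)]
    have h0 : (((([] : List (List String)).length) : Int)) = 0 := by simp
    rw [pv_main contacts contacts [] PySem.Set.empty 0 rfl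
      (by intro c; simp [PySem.Set.empty])]
    rw [h0]
    apply PySem.List.foldl_congr_mem
    intro t q _
    have hcond : ((PySem.List.enumerate q.2 0).all
          (fun r => pvFo 0 contacts r.2 == some (q.1, r.1)))
        = ((PySem.List.enumerate q.2 0).all
          (fun r => ((PySem.List.enumerate contacts 0).foldl
              (fun d p =>
                (PySem.List.enumerate p.2 0).foldl
                  (fun d q => if PySem.Dict.contains d q.2 then d
                    else PySem.Dict.insert d q.2 (p.1, q.1)) d)
              PySem.Dict.empty).get? r.2 == some (q.1, r.1))) := by
      apply List.all_congr rfl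
      intro r
      rw [pv_outer_get? contacts 0 PySem.Dict.empty r.2]
      simp [PySem.Dict.get?_empty]
    rw [hcond]
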